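-- pv_equiv track=rewrite | github.com/yuyufei88/cjCashierOCR | python/color_split.py | getpoint
-- ===== SOURCE A (Python) =====
-- def getpoint(row_num,col_num):
--     left = []
--     start = []
--     i =1
--     while(i<len(row_num)):
--         if row_num[i] > row_num[i - 1]:
--             start.append(row_num[i - 1])
--             j = i
--             while(j<len(row_num)-1):
--                 if row_num[j] <= start[0]:
--                     left.append([i-1,j+1])
--                     i = j
--                     break
--                 j +=1
--         i+=1
--     for i in range(1,len(col_num)):
--         if col_num[i]>col_num[i-1]:
--             top = i-1
--             break
--     for i in range(len(row_num)-1,1,-1):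
--         if row_num[i]<row_num[i-1]:
--             right = i-1
--             break
--     for i in range(len(col_num)-1,1,-1):
--         if col_num[i]<col_num[i-1]:
--             bottom = i
--             break
--     return left,top,right,bottom
-- ===== SOURCE B (Python) =====
-- def getpoint(row_num, col_num):
--     n = len(row_num)
--     # left segments: one forward pass with a two-mode state machine instead of
--     # A's nested rescans. thr is the constant threshold (value left of the first
--     # ascent); seg holds the open segment's left index while hunting for the
--     # closing drop.
--     left = []
--     thr = None
--     seg = None
--     for k in range(1, n):
--         if seg is None and row_num[k] > row_num[k - 1]:
--             if thr is None:
--                 thr = row_num[k - 1]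
--             seg = k - 1
--         if seg is not None and k < n - 1 and row_num[k] <= thr:
--             left.append([seg, k + 1])
--             seg = None
--     top = next(i - 1 for i in range(1, len(col_num)) if col_num[i] > col_num[i - 1])
--     # right/bottom: forward pass keeping the LAST match (= A's first match from the end)
--     right = None
--     for i in range(2, n):
--         if row_num[i] < row_num[i - 1]:
--             right = i - 1
--     bottom = None
--     for i in range(2, len(col_num)):
--         if col_num[i] < col_num[i - 1]:
--             bottom = i
--     return left, top, right, bottom
-- ===== Notes on version B (the rewrite author's own statement) =====
-- stated objective: alternative
-- what changed: Replaced A's nested while loops (each ascent triggers a fresh inner rescan for the closing drop) by a single forward pass with a two-mode state machine over a fixed threshold, and computed right/bottom by a forward last-match pass instead of a backward first-match scan.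
import Mathlib
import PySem

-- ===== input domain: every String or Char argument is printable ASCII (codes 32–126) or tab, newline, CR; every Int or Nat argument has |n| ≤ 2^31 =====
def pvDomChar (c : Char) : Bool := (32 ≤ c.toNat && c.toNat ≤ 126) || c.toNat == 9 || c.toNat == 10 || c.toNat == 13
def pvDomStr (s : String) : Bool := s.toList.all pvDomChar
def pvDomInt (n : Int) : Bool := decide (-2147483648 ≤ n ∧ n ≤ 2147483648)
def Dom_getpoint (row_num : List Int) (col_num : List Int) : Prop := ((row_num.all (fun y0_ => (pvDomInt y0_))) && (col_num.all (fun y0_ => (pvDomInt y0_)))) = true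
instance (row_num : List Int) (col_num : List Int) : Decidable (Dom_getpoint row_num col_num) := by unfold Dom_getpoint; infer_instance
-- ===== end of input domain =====

-- B replaces A's nested rescanning while-loops by a single forward state-machine pass
-- (objective: alternative algorithm, same measured cost); right/bottom become forward last-match passes.

-- ===== PORT A =====
-- inner while loop of A: first j in [j0, len-2] with row_num[j] <= s0 (None = no break)
def getpointInner (row_num : List Int) (s0 : Int) (j0 : Nat) : Option Nat :=
  (List.range' j0 (row_num.length - 1 - j0)).find? (fun j => decide (row_num.getD j 0 ≤ s0))

-- termination helper for the outer loop: the inner loop's break index is ≥ its start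
theorem getpointInner_ge {row_num : List Int} {s0 : Int} {j0 j : Nat}
    (h : getpointInner row_num s0 j0 = some j) : j0 ≤ j := by
  have hm := List.mem_of_find?_eq_some h
  have := List.mem_range'.1 hm
  omega

-- outer while loop of A; `start` is A's growing list, `start[0]` ported as headD 0
-- (start is nonempty whenever indexed, so headD is exact)
def getpointOuter (row_num : List Int) (left : List (List Int)) (start : List Int) (i : Nat) :
    List (List Int) :=
  if _h : i < row_num.length then
    if row_num.getD i 0 > row_num.getD (i - 1) 0 then
      let start' := start ++ [row_num.getD (i - 1) 0]
      match hj : getpointInner row_num (start'.headD 0) i with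
      | some j => getpointOuter row_num (left ++ [[(i : Int) - 1, (j : Int) + 1]]) start' (j + 1)
      | none => getpointOuter row_num left start' (i + 1)
    else getpointOuter row_num left start (i + 1)
  else left
termination_by row_num.length - i
decreasing_by
  · have := getpointInner_ge hj; omega
  · omega
  · omega

-- the three for-break scans; `none` corresponds to Python's NameError (excluded by Pre_)
def getpoint (row_num : List Int) (col_num : List Int) : List (List Int) × Int × Int × Int :=
  let left := getpointOuter row_num [] [] 1
  let top : Int :=
    match (List.range' 1 (col_num.length - 1)).find?
        (fun i => decide (col_num.getD i 0 > col_num.getD (i - 1) 0)) with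
    | some i => (i : Int) - 1
    | none => 0
  let right : Int :=
    match ((List.range' 2 (row_num.length - 2)).reverse).find?
        (fun i => decide (row_num.getD i 0 < row_num.getD (i - 1) 0)) with
    | some i => (i : Int) - 1
    | none => 0
  let bottom : Int :=
    match ((List.range' 2 (col_num.length - 2)).reverse).find?
        (fun i => decide (col_num.getD i 0 < col_num.getD (i - 1) 0)) with
    | some i => (i : Int)
    | none => 0
  (left, top, right, bottom)

-- ===== PORT B =====
-- one step of B's forward state machine: state = (left, thr, seg);
-- thr/seg are Python's None-able variables; thr.getD is exact since thr is set whenever seg is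
def getpointAltStep (row_num : List Int) (n : Nat)
    (st : List (List Int) × Option Int × Option Int) (k : Nat) :
    List (List Int) × Option Int × Option Int :=
  let left := st.1
  let ts :=
    if st.2.2 = none ∧ row_num.getD k 0 > row_num.getD (k - 1) 0 then
      (some (st.2.1.getD (row_num.getD (k - 1) 0)), some ((k : Int) - 1))
    else st.2
  match ts.2 with
  | some s =>
      if k < n - 1 ∧ row_num.getD k 0 ≤ ts.1.getD 0 then (left ++ [[s, (k : Int) + 1]], ts.1, none)
      else (left, ts.1, some s)
  | none => (left, ts.1, none)

def getpoint_alt (row_num : List Int) (col_num : List Int) : List (List Int) × Int × Int × Int :=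
  let n := row_num.length
  let fin := (List.range' 1 (n - 1)).foldl (getpointAltStep row_num n) ([], none, none)
  let left := fin.1
  let top : Int :=
    match (List.range' 1 (col_num.length - 1)).find?
        (fun i => decide (col_num.getD i 0 > col_num.getD (i - 1) 0)) with
    | some i => (i : Int) - 1
    | none => 0  -- Python B: StopIteration, excluded by Pre_
  -- forward last-match passes; `none` (Python's None result) ported as 0, excluded by Pre_
  let right : Int :=
    ((List.range' 2 (n - 2)).foldl
      (fun acc i => if row_num.getD i 0 < row_num.getD (i - 1) 0 then some ((i : Int) - 1) else acc)
      none).getD 0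
  let bottom : Int :=
    ((List.range' 2 (col_num.length - 2)).foldl
      (fun acc i => if col_num.getD i 0 < col_num.getD (i - 1) 0 then some ((i : Int)) else acc)
      none).getD 0
  (left, top, right, bottom)

-- ===== PRECONDITION & SPEC =====
-- Pre_ excludes exactly the inputs on which A raises NameError: one of top/right/bottom
-- is never assigned because its scan finds no matching adjacent pair.
def Pre_getpoint (row_num : List Int) (col_num : List Int) : Prop :=
  (∃ i, i < col_num.length ∧ (1 ≤ i ∧ col_num.getD i 0 > col_num.getD (i - 1) 0)) ∧
  (∃ i, i < row_num.length ∧ (2 ≤ i ∧ row_num.getD i 0 < row_num.getD (i - 1) 0)) ∧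
  (∃ i, i < col_num.length ∧ (2 ≤ i ∧ col_num.getD i 0 < col_num.getD (i - 1) 0))
instance (row_num : List Int) (col_num : List Int) : Decidable (Pre_getpoint row_num col_num) := by
  unfold Pre_getpoint; infer_instance

def pvWitness_getpoint : List Int × List Int := ([0, 1, 0], [0, 1, 0])

def Spec_getpoint (row_num : List Int) (col_num : List Int)
    (out : List (List Int) × Int × Int × Int) : Prop := out = getpoint_alt row_num col_num
instance (row_num : List Int) (col_num : List Int) (out : List (List Int) × Int × Int × Int) :
    Decidable (Spec_getpoint row_num col_num out) := by unfold Spec_getpoint; infer_instance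

-- ===== CLAIM (what is proved, stated in full; the proofs are below) =====
def Claim_equal_getpoint : Prop := ∀ (row_num : List Int) (col_num : List Int),
  Dom_getpoint row_num col_num → Pre_getpoint row_num col_num →
  Spec_getpoint row_num col_num (getpoint row_num col_num)

-- ===== LEMMAS AND PROOFS =====

-- a forward fold keeping the last match equals find? on the reversed list
theorem lastKeep (p : Nat → Prop) [DecidablePred p] (f : Nat → Int) :
    ∀ (l : List Nat) (init : Option Int),
      l.foldl (fun acc i => if p i then some (f i) else acc) init
        = (match l.reverse.find? (fun i => decide (p i)) with
           | some j => some (f j)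
           | none => init) := by
  intro l
  induction l with
  | nil => intro init; simp
  | cons a t ih =>
      intro init
      simp only [List.foldl_cons, List.reverse_cons, List.find?_append]
      rw [ih]
      cases h : t.reverse.find? (fun i => decide (p i)) with
      | some j => simp
      | none =>
          simp only [Option.none_or]
          by_cases hp : p a <;> simp [List.find?, hp]

-- once every candidate position fails the threshold test, A's outer loop appends nothing more
theorem stuckA (row_num : List Int) (t : Int) (i0 : Nat)
    (hstuck : ∀ k, i0 ≤ k → k < row_num.length - 1 → ¬ row_num.getD k 0 ≤ t) :
    ∀ (m i : Nat) (left : List (List Int)) (start : List Int),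
      row_num.length - i ≤ m → i0 ≤ i → start ≠ [] → start.headD 0 = t →
      getpointOuter row_num left start i = left := by
  intro m
  induction m with
  | zero =>
      intro i left start hm _ _ _
      rw [getpointOuter]
      have : ¬ i < row_num.length := by omega
      simp [this]
  | succ m ih =>
      intro i left start hm hi0 hne hhd
      rw [getpointOuter]
      by_cases hi : i < row_num.length
      · simp only [hi, dif_pos]
        by_cases hasc : row_num.getD i 0 > row_num.getD (i - 1) 0
        · simp only [hasc, if_pos]
          have hhd' : (start ++ [row_num.getD (i - 1) 0]).headD 0 = t := by
            cases start with
            | nil => exact absurd rfl hne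
            | cons a s => simpa using hhd
          have hnone : getpointInner row_num ((start ++ [row_num.getD (i - 1) 0]).headD 0) i = none := by
            rw [getpointInner, List.find?_eq_none]
            intro x hx
            have hx' := List.mem_range'.1 hx
            rw [hhd']
            simpa using hstuck x (by omega) (by omega)
          rw [hnone]
          exact ih (i + 1) left _ (by omega) (by omega) (by simp) hhd'
        · simp only [hasc, if_false]
          exact ih (i + 1) left start (by omega) (by omega) hne hhd
      · simp [hi]

-- B's pass while in drop-hunting mode, related to A's inner scan
theorem dropB (row_num : List Int) (t : Int) :
    ∀ (m k : Nat) (left : List (List Int)) (s : Int),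
      row_num.length - k ≤ m →
      ((List.range' k (row_num.length - k)).foldl
          (getpointAltStep row_num row_num.length) (left, some t, some s)).1
        = (match (List.range' k (row_num.length - 1 - k)).find?
              (fun j => decide (row_num.getD j 0 ≤ t)) with
           | some j =>
              ((List.range' (j + 1) (row_num.length - (j + 1))).foldl
                (getpointAltStep row_num row_num.length)
                (left ++ [[s, (j : Int) + 1]], some t, none)).1
           | none => left) := by
  intro m
  induction m with
  | zero =>
      intro k left s hm
      have h1 : row_num.length - k = 0 := by omega
      have h2 : row_num.length - 1 - k = 0 := by omega
      simp [h1, h2]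
  | succ m ih =>
      intro k left s hm
      by_cases hk : k < row_num.length
      · have hr : List.range' k (row_num.length - k)
            = k :: List.range' (k + 1) (row_num.length - (k + 1)) := by
          have : row_num.length - k = (row_num.length - (k + 1)) + 1 := by omega
          rw [this, List.range'_succ]
        rw [hr, List.foldl_cons]
        have hstep : getpointAltStep row_num row_num.length (left, some t, some s) k
            = (if k < row_num.length - 1 ∧ row_num.getD k 0 ≤ t
                then (left ++ [[s, (k : Int) + 1]], some t, none)
                else (left, some t, some s)) := by
          simp [getpointAltStep]
        by_cases hlt : k < row_num.length - 1
        · have hr2 : List.range' k (row_num.length - 1 - k)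
              = k :: List.range' (k + 1) (row_num.length - 1 - (k + 1)) := by
            have : row_num.length - 1 - k = (row_num.length - 1 - (k + 1)) + 1 := by omega
            rw [this, List.range'_succ]
          rw [hr2]
          by_cases hp : row_num.getD k 0 ≤ t
          · have hp' : decide (row_num.getD k 0 ≤ t) = true := by simpa using hp
            rw [hstep]
            simp only [hlt, hp, and_self, if_true]
            rw [List.find?_cons, hp']
          · have hp' : decide (row_num.getD k 0 ≤ t) = false := by simpa using hp
            rw [hstep]
            simp only [hp, and_false, if_false]
            rw [ih (k + 1) left s (by omega)]
            rw [List.find?_cons, hp']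
        · -- k = row_num.length - 1: drop check fails, remaining range is empty
          have h2 : row_num.length - 1 - k = 0 := by omega
          have h3 : row_num.length - (k + 1) = 0 := by omega
          rw [hstep]
          simp [hlt, h2, h3]
      · have h1 : row_num.length - k = 0 := by omega
        have h2 : row_num.length - 1 - k = 0 := by omega
        simp [h1, h2]

-- main invariant: B's seek-mode fold from i equals A's outer loop at i, with thr = start.head?
theorem mainLoop (row_num : List Int) :
    ∀ (m i : Nat) (left : List (List Int)) (start : List Int),
      row_num.length - i ≤ m → 1 ≤ i →
      ((List.range' i (row_num.length - i)).foldl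
          (getpointAltStep row_num row_num.length) (left, start.head?, none)).1
        = getpointOuter row_num left start i := by
  intro m
  induction m with
  | zero =>
      intro i left start hm _
      have h0 : row_num.length - i = 0 := by omega
      rw [getpointOuter]
      have : ¬ i < row_num.length := by omega
      simp [h0, this]
  | succ m ih =>
      intro i left start hm hi1
      by_cases hi : i < row_num.length
      · have hr : List.range' i (row_num.length - i)
            = i :: List.range' (i + 1) (row_num.length - (i + 1)) := by
          have : row_num.length - i = (row_num.length - (i + 1)) + 1 := by omega
          rw [this, List.range'_succ]
        rw [getpointOuter]
        simp only [hi, dif_pos]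
        by_cases hasc : row_num.getD i 0 > row_num.getD (i - 1) 0
        · simp only [hasc, if_pos]
          set start' := start ++ [row_num.getD (i - 1) 0] with hstart'
          have hhd : start'.head? = some (start'.headD 0) := by
            cases start <;> simp [hstart']
          have hthr : (start.head?).getD (row_num.getD (i - 1) 0) = start'.headD 0 := by
            cases start <;> simp [hstart']
          have hasc2 : row_num[i - 1]?.getD 0 < row_num[i]?.getD 0 := by
            simpa [List.getD] using hasc
          have hthr2 : (start.head?).getD (row_num[i - 1]?.getD 0) = start'.headD 0 := by
            simpa [List.getD] using hthr
          -- B's step at i from seek mode enters drop mode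
          have hstep : getpointAltStep row_num row_num.length (left, start.head?, none) i
              = (if i < row_num.length - 1 ∧ row_num.getD i 0 ≤ start'.headD 0
                  then (left ++ [[(i : Int) - 1, (i : Int) + 1]], some (start'.headD 0), none)
                  else (left, some (start'.headD 0), some ((i : Int) - 1))) := by
            simp only [getpointAltStep, List.getD]
            simp [hasc2, hthr2]
          have hfold : ((List.range' i (row_num.length - i)).foldl
                (getpointAltStep row_num row_num.length) (left, start.head?, none)).1
              = ((List.range' i (row_num.length - i)).foldl
                (getpointAltStep row_num row_num.length)
                (left, some (start'.headD 0), some ((i : Int) - 1))).1 := by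
            rw [hr, List.foldl_cons, List.foldl_cons, hstep]
            have hstep2 : getpointAltStep row_num row_num.length
                (left, some (start'.headD 0), some ((i : Int) - 1)) i
                = (if i < row_num.length - 1 ∧ row_num.getD i 0 ≤ start'.headD 0
                    then (left ++ [[(i : Int) - 1, (i : Int) + 1]], some (start'.headD 0), none)
                    else (left, some (start'.headD 0), some ((i : Int) - 1))) := by
              simp only [getpointAltStep, List.getD]
              simp
            rw [hstep2]
          rw [hfold, dropB row_num (start'.headD 0) (m + 1) i left ((i : Int) - 1) hm]
          cases hj : getpointInner row_num (start'.headD 0) i with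
          | some j =>
              rw [getpointInner] at hj
              rw [hj]
              have hji : i ≤ j := by
                have := List.mem_range'.1 (List.mem_of_find?_eq_some hj)
                omega
              rw [← hhd]
              exact ih (j + 1) _ start' (by omega) (by omega)
          | none =>
              rw [getpointInner] at hj
              rw [hj]
              have hstuck : ∀ k, i ≤ k → k < row_num.length - 1 →
                  ¬ row_num.getD k 0 ≤ start'.headD 0 := by
                intro k hik hk
                have := List.find?_eq_none.1 hj k (List.mem_range'.2 ⟨k - i, by omega, by omega⟩)
                simpa using this
              -- A keeps rescanning from later positions and failing; result stays `left`
              exact (stuckA row_num (start'.headD 0) i hstuck m (i + 1) left start'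
                (by omega) (by omega) (by simp [hstart']) rfl).symm
        · simp only [hasc, if_false]
          have hasc2 : ¬ row_num[i - 1]?.getD 0 < row_num[i]?.getD 0 := by
            simpa [List.getD] using hasc
          have hstep : getpointAltStep row_num row_num.length (left, start.head?, none) i
              = (left, start.head?, none) := by
            simp only [getpointAltStep, List.getD]
            simp [hasc2]
          rw [hr, List.foldl_cons, hstep]
          exact ih (i + 1) left start (by omega) (by omega)
      · have h0 : row_num.length - i = 0 := by omega
        rw [getpointOuter]
        simp [h0, hi]

-- a last-match fold with default 0 equals the first match on the reversed list (default 0)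
theorem scanEq (l : List Nat) (p : Nat → Prop) [DecidablePred p] (g : Nat → Int) :
    ((l.foldl (fun acc i => if p i then some (g i) else acc) none).getD 0)
      = (match l.reverse.find? (fun i => decide (p i)) with
         | some j => g j
         | none => (0 : Int)) := by
  rw [lastKeep]
  cases l.reverse.find? (fun i => decide (p i)) <;> simp

-- ===== VERDICT (by name: the statement is the Claim_ definition above) =====
theorem getpoint_spec : Claim_equal_getpoint := by
  intro row_num col_num _ _
  show getpoint row_num col_num = getpoint_alt row_num col_num
  show (getpointOuter row_num [] [] 1,
        (match (List.range' 1 (col_num.length - 1)).find?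
            (fun i => decide (col_num.getD i 0 > col_num.getD (i - 1) 0)) with
         | some i => (i : Int) - 1
         | none => 0),
        (match ((List.range' 2 (row_num.length - 2)).reverse).find?
            (fun i => decide (row_num.getD i 0 < row_num.getD (i - 1) 0)) with
         | some i => (i : Int) - 1
         | none => 0),
        (match ((List.range' 2 (col_num.length - 2)).reverse).find?
            (fun i => decide (col_num.getD i 0 < col_num.getD (i - 1) 0)) with
         | some i => (i : Int)
         | none => 0))
      = (((List.range' 1 (row_num.length - 1)).foldl
            (getpointAltStep row_num row_num.length) ([], none, none)).1,
        (match (List.range' 1 (col_num.length - 1)).find?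
            (fun i => decide (col_num.getD i 0 > col_num.getD (i - 1) 0)) with
         | some i => (i : Int) - 1
         | none => 0),
        ((List.range' 2 (row_num.length - 2)).foldl
          (fun acc i => if row_num.getD i 0 < row_num.getD (i - 1) 0 then some ((i : Int) - 1) else acc)
          none).getD 0,
        ((List.range' 2 (col_num.length - 2)).foldl
          (fun acc i => if col_num.getD i 0 < col_num.getD (i - 1) 0 then some ((i : Int)) else acc)
          none).getD 0)
  have hleft := mainLoop row_num row_num.length 1 [] [] (by omega) (le_refl 1)
  have hright := scanEq (List.range' 2 (row_num.length - 2))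
    (fun i => row_num.getD i 0 < row_num.getD (i - 1) 0) (fun i => (i : Int) - 1)
  have hbottom := scanEq (List.range' 2 (col_num.length - 2))
    (fun i => col_num.getD i 0 < col_num.getD (i - 1) 0) (fun i => (i : Int))
  simp only [Prod.mk.injEq]
  refine ⟨?_, trivial, ?_, ?_⟩
  · simpa using hleft.symm
  · exact hright.symm
  · exact hbottom.symm
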